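-- pv_equiv track=rewrite | github.com/Samuel-DD07/Personnal-Project | Generator-Lettre-Motivation/generator.py | SearchWordToReplace
-- ===== SOURCE A (Python) =====
-- def SearchWordToReplace(file):
--     MyWordToReplace = {}
--     word = ""
--
--     for i in file:
--         if(i != " " and i != "." and i != ","):
--             word += i
--         else:
--             if "_" in word:
--                 MyWordToReplace[word] = "test"
--             word = ""
--
--     return MyWordToReplace
-- ===== SOURCE B (Python) =====
-- def SearchWordToReplace(file):
--     tokens = file.replace(".", " ").replace(",", " ").split(" ")
--     return {w: "test" for w in tokens[:-1] if "_" in w}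
-- ===== Notes on version B (the rewrite author's own statement) =====
-- stated objective: idiomatic
-- what changed: Replaced A's character-by-character word-accumulator loop with a split-then-filter pipeline: normalise the two punctuation delimiters to spaces, split on the space character, drop the never-flushed last token, and build the dict with a comprehension; the per-character interpreted loop becomes a few C-level str operations.
import Mathlib
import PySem

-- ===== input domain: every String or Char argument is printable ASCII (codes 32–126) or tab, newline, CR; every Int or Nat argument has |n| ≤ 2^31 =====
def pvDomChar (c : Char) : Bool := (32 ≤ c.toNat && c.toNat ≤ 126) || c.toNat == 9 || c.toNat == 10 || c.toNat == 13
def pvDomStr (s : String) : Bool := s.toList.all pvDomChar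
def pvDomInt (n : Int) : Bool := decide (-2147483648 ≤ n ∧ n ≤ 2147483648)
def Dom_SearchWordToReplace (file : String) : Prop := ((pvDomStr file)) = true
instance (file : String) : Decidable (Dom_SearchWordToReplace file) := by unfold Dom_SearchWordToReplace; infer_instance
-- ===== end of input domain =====

-- B replaces A's character-by-character accumulator loop with a split-then-filter
-- pipeline (replace delimiters, split on ' ', drop the unflushed last token, dict
-- comprehension); objective: idiomatic. Same return value on every input.

-- ===== PORT A =====
-- one step of A's 'for i in file' loop; state = (MyWordToReplace, word)
def pvStepA (st : PySem.Dict String String × List Char) (i : Char) :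
    PySem.Dict String String × List Char :=
  if i ≠ ' ' ∧ i ≠ '.' ∧ i ≠ ',' then (st.1, st.2 ++ [i])
  else (if PySem.Chars.isIn ['_'] st.2 then st.1.insert (String.ofList st.2) "test" else st.1, st.2.take 0)

def SearchWordToReplace (file : String) : List (String × String) :=
  (file.toList.foldl pvStepA (PySem.Dict.empty, [])).1.items

-- ===== PORT B =====
def SearchWordToReplace_alt (file : String) : List (String × String) :=
  -- tokens = file.replace(".", " ").replace(",", " ").split(" ")
  let tokens := PySem.Chars.splitOn
    (PySem.Chars.replace (PySem.Chars.replace file.toList ['.'] [' ']) [','] [' ']) [' ']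
  -- {w: "test" for w in tokens[:-1] if "_" in w}
  (((PySem.List.slice tokens none (some (-1))).filter
      (fun w => PySem.Chars.isIn ['_'] w)).foldl
    (fun d w => d.insert (String.ofList w) "test") PySem.Dict.empty).items

-- ===== PRECONDITION & SPEC =====
def Spec_SearchWordToReplace (file : String) (out : List (String × String)) : Prop := out = SearchWordToReplace_alt file
instance (file : String) (out : List (String × String)) : Decidable (Spec_SearchWordToReplace file out) := by unfold Spec_SearchWordToReplace; infer_instance

-- ===== CLAIM (what is proved, stated in full; the proofs are below) =====
def Claim_equal_SearchWordToReplace : Prop := ∀ (file : String), Dom_SearchWordToReplace file → Spec_SearchWordToReplace file (SearchWordToReplace file)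

-- ===== LEMMAS AND PROOFS =====

-- the composite character substitution performed by the two replaces
def pvSub (c : Char) : Char := if c = '.' then ' ' else if c = ',' then ' ' else c

-- split at every occurrence of the character s (shape of str.split(" "))
def pvSplitTok (s : Char) : List Char → List (List Char)
  | [] => [[]]
  | c :: cs =>
    if c = s then [] :: pvSplitTok s cs
    else
      match pvSplitTok s cs with
      | [] => [[c]]
      | t :: ts => (c :: t) :: ts

-- prepend a pending prefix onto the first token
def pvGlue (w : List Char) : List (List Char) → List (List Char)
  | [] => [w]
  | t :: ts => (w ++ t) :: ts

lemma pvSplitTok_ne_nil (s : Char) (cs : List Char) : pvSplitTok s cs ≠ [] := by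
  cases cs with
  | nil => simp [pvSplitTok]
  | cons c t =>
    simp only [pvSplitTok]
    split_ifs
    · simp
    · cases h : pvSplitTok s t <;> simp

lemma pvGlue_nil {l : List (List Char)} (h : l ≠ []) : pvGlue [] l = l := by
  cases l with
  | nil => exact absurd rfl h
  | cons t ts => simp [pvGlue]

lemma pvReplaceGo (o n : Char) :
    ∀ (l : List Char) (fuel : Nat) (acc : List Char), l.length ≤ fuel →
      PySem.Chars.replace.go [o] [n] fuel l acc
        = acc.reverse ++ l.map (fun c => if c = o then n else c) := by
  intro l
  induction l with
  | nil =>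
    intro fuel acc _
    cases fuel <;> simp [PySem.Chars.replace.go]
  | cons c t ih =>
    intro fuel acc h
    cases fuel with
    | zero => simp at h
    | succ f =>
      by_cases hc : c = o
      · have hpre : List.isPrefixOf [o] (c :: t) = true := by
          simp [List.isPrefixOf, hc]
        rw [PySem.Chars.replace.go]
        simp only [hpre, if_pos]
        rw [show List.drop [o].length (c :: t) = t by simp]
        rw [ih f ([n].reverse ++ acc) (by simpa using Nat.lt_succ_iff.mp (by simpa using h))]
        simp [hc]
      · have hpre : List.isPrefixOf [o] (c :: t) = false := by
          simp [List.isPrefixOf]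
          intro h'; exact absurd h'.symm hc
        rw [PySem.Chars.replace.go]
        simp only [hpre, Bool.false_eq_true, if_neg, not_false_iff]
        rw [ih f (c :: acc) (by simpa using Nat.lt_succ_iff.mp (by simpa using h))]
        simp [hc]

lemma pvReplace (o n : Char) (s : List Char) :
    PySem.Chars.replace s [o] [n] = s.map (fun c => if c = o then n else c) := by
  unfold PySem.Chars.replace
  simp only [List.isEmpty_cons, Bool.false_eq_true, if_neg, not_false_iff]
  simpa using pvReplaceGo o n s s.length [] le_rfl

lemma pvSplitGo (s : Char) :
    ∀ (l : List Char) (fuel : Nat) (cur : List Char) (acc : List (List Char)),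
      l.length < fuel →
      PySem.Chars.splitOn.go [s] fuel l cur acc
        = acc.reverse ++ pvGlue cur.reverse (pvSplitTok s l) := by
  intro l
  induction l with
  | nil =>
    intro fuel cur acc h
    cases fuel with
    | zero => simp at h
    | succ f => simp [PySem.Chars.splitOn.go, pvSplitTok, pvGlue]
  | cons c t ih =>
    intro fuel cur acc h
    cases fuel with
    | zero => simp at h
    | succ f =>
      have ht : t.length < f := by simpa using Nat.lt_succ_iff.mp (by simpa using h)
      by_cases hc : c = s
      · have hpre : List.isPrefixOf [s] (c :: t) = true := by
          simp [List.isPrefixOf, hc]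
        rw [PySem.Chars.splitOn.go]
        simp only [hpre, if_pos]
        rw [show List.drop [s].length (c :: t) = t by simp]
        rw [ih f [] (cur.reverse :: acc) ht]
        rw [List.reverse_nil, pvGlue_nil (by simp; exact pvSplitTok_ne_nil s t)]
        simp [pvSplitTok, hc, pvGlue]
      · have hpre : List.isPrefixOf [s] (c :: t) = false := by
          simp [List.isPrefixOf]
          intro h'; exact absurd h'.symm hc
        rw [PySem.Chars.splitOn.go]
        simp only [hpre, Bool.false_eq_true, if_neg, not_false_iff]
        rw [ih f (c :: cur) acc ht]
        obtain ⟨u, us, hu⟩ : ∃ u us, pvSplitTok s t = u :: us := by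
          cases hx : pvSplitTok s t with
          | nil => exact absurd hx (pvSplitTok_ne_nil s t)
          | cons u us => exact ⟨u, us, rfl⟩
        simp [pvSplitTok, hc, hu, pvGlue]

lemma pvSplitOn (s : Char) (l : List Char) :
    PySem.Chars.splitOn l [s] = pvSplitTok s l := by
  unfold PySem.Chars.splitOn
  rw [pvSplitGo s l (l.length + 1) [] [] (by omega)]
  simp [List.reverse_nil, pvGlue_nil (pvSplitTok_ne_nil s l)]

-- the two successive replaces act as the single substitution pvSub
lemma pvSub_eq (cs : List Char) :
    PySem.Chars.replace (PySem.Chars.replace cs ['.'] [' ']) [','] [' '] = cs.map pvSub := by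
  rw [pvReplace, pvReplace, List.map_map]
  apply List.map_congr_left
  intro c _
  by_cases h1 : c = '.' <;> by_cases h2 : c = ',' <;> simp [pvSub, Function.comp, h1, h2]

-- the core invariant: A's character loop computes B's fold over the
-- underscore-containing tokens of all but the last (never-flushed) word
lemma pvMain (cs : List Char) :
    ∀ (d : PySem.Dict String String) (w : List Char),
      (cs.foldl pvStepA (d, w)).1
        = ((pvGlue w (pvSplitTok ' ' (cs.map pvSub))).dropLast.filter
            (fun t => PySem.Chars.isIn ['_'] t)).foldl
            (fun d w => d.insert (String.ofList w) "test") d := by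
  induction cs with
  | nil =>
    intro d w
    simp [pvSplitTok, pvGlue]
  | cons c t ih =>
    intro d w
    by_cases hd : c ≠ ' ' ∧ c ≠ '.' ∧ c ≠ ','
    · -- word-building character
      have hsub : pvSub c = c := by simp [pvSub, hd.2.1, hd.2.2]
      have hc : c ≠ ' ' := hd.1
      obtain ⟨u, us, hu⟩ : ∃ u us, pvSplitTok ' ' (t.map pvSub) = u :: us := by
        cases hx : pvSplitTok ' ' (t.map pvSub) with
        | nil => exact absurd hx (pvSplitTok_ne_nil _ _)
        | cons u us => exact ⟨u, us, rfl⟩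
      simp only [List.map_cons, hsub, List.foldl_cons, pvStepA, hd, if_pos, ne_eq,
        not_false_iff, and_self, pvSplitTok, if_neg, hu]
      rw [ih d (w ++ [c])]
      simp [pvGlue, hu]
    · -- delimiter: flush the word
      have hsub : pvSub c = ' ' := by
        simp only [ne_eq, not_and_or, not_not] at hd
        rcases hd with h | h | h <;> simp [pvSub, h]
      obtain ⟨u, us, hu⟩ : ∃ u us, pvSplitTok ' ' (t.map pvSub) = u :: us := by
        cases hx : pvSplitTok ' ' (t.map pvSub) with
        | nil => exact absurd hx (pvSplitTok_ne_nil _ _)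
        | cons u us => exact ⟨u, us, rfl⟩
      have hsp : pvSplitTok ' ' ((c :: t).map pvSub)
          = [] :: pvSplitTok ' ' (t.map pvSub) := by simp [hsub, pvSplitTok]
      rw [hsp]
      simp only [List.foldl_cons, pvStepA, if_neg hd, List.take_zero]
      rw [ih _ []]
      rw [hu]
      simp only [pvGlue, List.nil_append, List.append_nil]
      rw [List.dropLast_cons_of_ne_nil (by simp : (u :: us) ≠ [])]
      rw [List.filter_cons]
      by_cases hw : PySem.Chars.isIn ['_'] w = true
      · simp [hw]
      · simp [hw]

-- ===== VERDICT (by name: the statement is the Claim_ definition above) =====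
theorem SearchWordToReplace_spec : Claim_equal_SearchWordToReplace := by
  intro file _
  unfold Spec_SearchWordToReplace SearchWordToReplace SearchWordToReplace_alt
  simp only [pvSub_eq, pvSplitOn, PySem.List.slice_to_neg_one]
  rw [pvMain file.toList PySem.Dict.empty []]
  rw [pvGlue_nil (pvSplitTok_ne_nil _ _)]
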